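-- pv_equiv track=rewrite | github.com/FraLotito/higher-order-motifs | utils.py | is_connected
-- ===== SOURCE A (Python) =====
-- def is_connected(edges, N):
--     nodes = set()
--     for e in edges:
--         for n in e:
--             nodes.add(n)
--
--     if len(nodes) != N:
--         return False
--
--     visited = {}
--     for i in nodes:
--         visited[i] = False
--     graph = {}
--     for i in nodes:
--         graph[i] = []
--
--     for edge in edges:
--         for i in range(len(edge)):
--             for j in range(len(edge)):
--                 if edge[i] != edge[j]:
--                     graph[edge[i]].append(edge[j])
--                     graph[edge[j]].append(edge[i])
--
--     q = []
--     nodes = list(nodes)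
--     q.append(nodes[0])
--     while len(q) != 0:
--         v = q.pop(len(q) - 1)
--         if not visited[v]:
--             visited[v] = True
--             for i in graph[v]:
--                 q.append(i)
--     conn = True
--     for i in nodes:
--         if not visited[i]:
--             conn = False
--             break
--     return conn
-- ===== SOURCE B (Python) =====
-- def is_connected(edges, N):
--     nodes = set()
--     for e in edges:
--         nodes.update(e)
--     if len(nodes) != N:
--         return False
--     if not nodes:
--         return True
--     # saturate: absorb every edge that touches the reached set, until fixpoint
--     root = next(n for e in edges for n in e)
--     reached = {root}
--     changed = True
--     while changed:
--         changed = False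
--         for e in edges:
--             if not reached.issuperset(e) and not reached.isdisjoint(e):
--                 reached.update(e)
--                 changed = True
--     return len(reached) == len(nodes)
-- ===== Notes on version B (the rewrite author's own statement) =====
-- stated objective: alternative
-- what changed: A expands every hyperedge into a quadratic pairwise adjacency dict and runs a stack-based DFS over it; B never builds a graph: it grows the component of one seed node by repeatedly absorbing whole edges that touch it until a fixpoint, then compares set sizes.
import Mathlib
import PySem

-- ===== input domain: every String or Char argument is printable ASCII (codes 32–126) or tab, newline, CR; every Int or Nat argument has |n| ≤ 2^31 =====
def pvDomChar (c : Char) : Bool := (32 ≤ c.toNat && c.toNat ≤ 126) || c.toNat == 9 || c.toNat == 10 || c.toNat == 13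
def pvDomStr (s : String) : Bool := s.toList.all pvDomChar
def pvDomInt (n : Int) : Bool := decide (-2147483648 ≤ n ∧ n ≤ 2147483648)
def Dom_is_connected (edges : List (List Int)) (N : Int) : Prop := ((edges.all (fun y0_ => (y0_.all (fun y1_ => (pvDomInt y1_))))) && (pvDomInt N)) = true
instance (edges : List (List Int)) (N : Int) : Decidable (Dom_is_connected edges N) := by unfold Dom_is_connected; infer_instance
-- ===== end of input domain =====

-- B replaces A's clique-expansion + DFS by edge-level saturation from one seed node (no per-pair adjacency lists); equivalence of the return values is proved on Pre_.


-- two counting lemmas cited by the termination proofs of both loops (decreasing_by)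
theorem pvFilterLenLe {α : Type} {l : List α} {p p' : α → Bool}
    (hmono : ∀ k, p' k = true → p k = true) :
    (l.filter p').length ≤ (l.filter p).length := by
  induction l with
  | nil => simp
  | cons a t ih =>
    simp only [List.filter_cons]
    cases hpa' : p' a with
    | true => simp [hmono a hpa', Nat.succ_le_succ ih]
    | false => cases hpa : p a <;> simp [ih, Nat.le_succ_of_le ih]

theorem pvFilterLenLt {α : Type} {l : List α} {p p' : α → Bool}
    (hmono : ∀ k, p' k = true → p k = true) {v : α} (hv : v ∈ l)
    (hp : p v = true) (hp' : p' v = false) :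
    (l.filter p').length < (l.filter p).length := by
  induction l with
  | nil => cases hv
  | cons a t ih =>
    simp only [List.filter_cons]
    rcases List.mem_cons.1 hv with rfl | hvt
    · simp only [hp, hp', if_true, List.length_cons]
      exact Nat.lt_succ_of_le (pvFilterLenLe hmono)
    · cases hpa' : p' a with
      | true => simpa [hmono a hpa'] using Nat.succ_lt_succ (ih hvt)
      | false => cases hpa : p a <;> simp [ih hvt, Nat.lt_succ_of_lt (ih hvt)]

-- ===== PORT A =====
-- number of graph keys not yet visited (termination measure for the DFS stack loop)
def pvUnvis (graph : PySem.Dict Int (List Int)) (visited : PySem.Dict Int Bool) : Nat :=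
  ((PySem.Dict.keys graph).filter (fun k => !(PySem.Dict.getD visited k false))).length

-- 'while len(q) != 0: v = q.pop(len(q)-1); …' — recursion on (unvisited keys, stack length)
def pvDfs (graph : PySem.Dict Int (List Int)) (visited : PySem.Dict Int Bool) (q : List Int) :
    PySem.Dict Int Bool :=
  match h : q.getLast? with
  | none => visited
  | some v =>
    if hvis : PySem.Dict.getD visited v false then pvDfs graph visited q.dropLast
    else pvDfs graph (PySem.Dict.insert visited v true)
          (q.dropLast ++ PySem.Dict.getD graph v [])
termination_by (pvUnvis graph visited, q.length)
decreasing_by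
  · have hq : q ≠ [] := by rintro rfl; simp at h
    exact Prod.Lex.right' _ (Nat.le_refl _)
      (by rw [List.length_dropLast]; have := List.length_pos_of_ne_nil hq; omega)
  · have hq : q ≠ [] := by rintro rfl; simp at h
    have hmono : ∀ k, (!(PySem.Dict.getD (PySem.Dict.insert visited v true) k false)) = true →
        (!(PySem.Dict.getD visited k false)) = true := by
      intro k hk
      rw [PySem.Dict.getD_insert] at hk
      by_cases hkv : k = v <;> simp [hkv] at hk ⊢ <;> exact hk
    by_cases hk : PySem.Dict.contains graph v = true
    · apply Prod.Lex.left
      exact pvFilterLenLt hmono ((PySem.Dict.contains_iff_mem_keys _ _).1 hk)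
        (by simp [hvis]) (by simp [PySem.Dict.getD_insert])
    · apply Prod.Lex.right' _ (pvFilterLenLe hmono)
      rw [PySem.Dict.getD_of_not_contains _ _ (Bool.eq_false_iff.mpr hk)]
      simp only [List.append_nil, List.length_dropLast]
      have := List.length_pos_of_ne_nil hq; omega

def is_connected (edges : List (List Int)) (N : Int) : Bool :=
  let nodes : PySem.Set Int :=
    edges.foldl (fun s e => e.foldl (fun s n => PySem.Set.add s n) s) PySem.Set.empty
  if (nodes.length : Int) ≠ N then false
  else
    let visited : PySem.Dict Int Bool :=
      nodes.foldl (fun d i => PySem.Dict.insert d i false) PySem.Dict.empty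
    let graph : PySem.Dict Int (List Int) :=
      nodes.foldl (fun d i => PySem.Dict.insert d i ([] : List Int)) PySem.Dict.empty
    -- graph[edge[i]].append(edge[j]) never hits a missing key in Python (every edge
    -- member is a node/key), so Dict.modify with default [] is exact on these inputs
    let graph := edges.foldl (fun g edge =>
      (List.range edge.length).foldl (fun g i =>
        (List.range edge.length).foldl (fun g j =>
          if edge[i]! ≠ edge[j]! then
            PySem.Dict.modify
              (PySem.Dict.modify g (edge[i]!) [] (fun l => l ++ [edge[j]!]))
              (edge[j]!) [] (fun l => l ++ [edge[i]!])
          else g) g) g) graph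
    let visited := pvDfs graph visited [nodes[0]!]
    -- 'conn = True; for i in nodes: if not visited[i]: conn = False; break'
    nodes.all (fun i => PySem.Dict.getD visited i false)

-- ===== PORT B =====
-- body of the inner 'for e in edges' loop: absorb e if it touches reached but is not contained
def pvAbsorb (p : PySem.Set Int × Bool) (e : List Int) : PySem.Set Int × Bool :=
  if !(e.all (fun x => PySem.Set.contains p.1 x)) && e.any (fun x => PySem.Set.contains p.1 x)
  then (PySem.Set.update p.1 e, true) else p

-- one full pass over the edges, with the 'changed' flag
def pvPass (edges : List (List Int)) (reached : PySem.Set Int) : PySem.Set Int × Bool :=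
  edges.foldl pvAbsorb (reached, false)

theorem pvFold_fst_mono (l : List (List Int)) :
    ∀ (p : PySem.Set Int × Bool) (x : Int), x ∈ p.1 → x ∈ (l.foldl pvAbsorb p).1 := by
  induction l with
  | nil => intro p x hx; simpa using hx
  | cons e t ih =>
    intro p x hx
    simp only [List.foldl_cons]
    apply ih
    unfold pvAbsorb
    split
    · exact (PySem.Set.mem_update _ _ _).2 (Or.inl hx)
    · exact hx

theorem pvPass_new (edges : List (List Int)) (reached : PySem.Set Int)
    (h : (pvPass edges reached).2 = true) :
    ∃ y, y ∈ edges.flatten ∧ y ∉ reached ∧ y ∈ (pvPass edges reached).1 := by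
  unfold pvPass at *
  induction edges generalizing reached with
  | nil => simp at h
  | cons e t ih =>
    simp only [List.foldl_cons] at h ⊢
    by_cases hc : (!(e.all (fun x => PySem.Set.contains reached x)) &&
        e.any (fun x => PySem.Set.contains reached x)) = true
    · have habs : pvAbsorb (reached, false) e = (PySem.Set.update reached e, true) := by
        unfold pvAbsorb; simp only [] at hc ⊢; rw [if_pos hc]
      rw [habs] at h ⊢
      rw [Bool.and_eq_true] at hc
      obtain ⟨x, hxe, hxr⟩ : ∃ x ∈ e, ¬ PySem.Set.contains reached x = true := by
        simpa using hc.1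
      refine ⟨x, List.mem_flatten.2 ⟨e, List.mem_cons_self .., hxe⟩, ?_, ?_⟩
      · simpa [PySem.Set.contains_iff] using hxr
      · exact pvFold_fst_mono t _ x ((PySem.Set.mem_update _ _ _).2 (Or.inr hxe))
    · have habs : pvAbsorb (reached, false) e = (reached, false) := by
        unfold pvAbsorb; simp only [] at hc ⊢; rw [if_neg hc]
      rw [habs] at h ⊢
      obtain ⟨y, hy1, hy2, hy3⟩ := ih reached h
      exact ⟨y, by simp [hy1], hy2, hy3⟩

-- 'while changed' saturation loop; a changing pass strictly grows reached inside the node universe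
def pvSat (edges : List (List Int)) (reached : PySem.Set Int) : PySem.Set Int :=
  let p := pvPass edges reached
  if h : p.2 then pvSat edges p.1 else p.1
termination_by ((PySem.Set.ofList edges.flatten).filter
    (fun x => !(PySem.Set.contains reached x))).length
decreasing_by
  obtain ⟨y, hy1, hy2, hy3⟩ := pvPass_new edges reached h
  refine pvFilterLenLt ?_ ((PySem.Set.mem_ofList _ _).2 hy1) ?_ ?_
  · intro k hk
    simp only [Bool.not_eq_true', ← Bool.not_eq_true, PySem.Set.contains_iff] at hk ⊢
    exact fun hmem => hk (pvFold_fst_mono edges _ k hmem)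
  · simp [PySem.Set.contains_iff, hy2]
  · simp [PySem.Set.contains_iff, hy3]

def is_connected_alt (edges : List (List Int)) (N : Int) : Bool :=
  let nodes : PySem.Set Int := edges.foldl (fun s e => PySem.Set.update s e) PySem.Set.empty
  if (nodes.length : Int) ≠ N then false
  else if nodes.isEmpty then true
  else
    let root := (edges.flatten)[0]!
    let reached := pvSat edges (PySem.Set.add PySem.Set.empty root)
    reached.length == nodes.length

-- ===== PRECONDITION & SPEC =====
-- Pre_ excludes only the inputs where A raises IndexError: no node occurs in any edge and
-- N = 0 (the size check passes and A evaluates nodes[0] on the empty node list).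
def Pre_is_connected (edges : List (List Int)) (N : Int) : Prop :=
  edges.flatten ≠ [] ∨ N ≠ 0
instance (edges : List (List Int)) (N : Int) : Decidable (Pre_is_connected edges N) := by
  unfold Pre_is_connected; infer_instance

def pvWitness_is_connected : List (List Int) × Int := ([[1, 2], [2, 3]], 3)

def Spec_is_connected (edges : List (List Int)) (N : Int) (out : Bool) : Prop :=
  out = is_connected_alt edges N
instance (edges : List (List Int)) (N : Int) (out : Bool) : Decidable (Spec_is_connected edges N out) := by
  unfold Spec_is_connected; infer_instance

-- ===== CLAIM (what is proved, stated in full; the proofs are below) =====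
def Claim_equal_is_connected : Prop := ∀ (edges : List (List Int)) (N : Int),
  Dom_is_connected edges N → Pre_is_connected edges N →
  Spec_is_connected edges N (is_connected edges N)

-- ===== LEMMAS AND PROOFS =====

theorem pvFold_snd_true (l : List (List Int)) :
    ∀ (r : PySem.Set Int), (l.foldl pvAbsorb (r, true)).2 = true := by
  induction l with
  | nil => intro r; rfl
  | cons e t ih =>
    intro r
    simp only [List.foldl_cons]
    unfold pvAbsorb
    split
    · exact ih _
    · exact ih _


-- nodes built by either port = ordered dedup of edges.flatten
theorem pvFoldlUpdate (l : List (List Int)) :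
    ∀ (s : PySem.Set Int), l.foldl (fun s e => PySem.Set.update s e) s
      = PySem.Set.update s l.flatten := by
  induction l with
  | nil => intro s; rfl
  | cons e t ih => intro s; simp only [List.foldl_cons, List.flatten_cons,
      PySem.Set.update_append, ih]

theorem pvNodesA (edges : List (List Int)) :
    edges.foldl (fun s e => e.foldl (fun s n => PySem.Set.add s n) s) PySem.Set.empty
      = PySem.Set.ofList edges.flatten := by
  have h : (fun (s : PySem.Set Int) (e : List Int) => e.foldl (fun s n => PySem.Set.add s n) s)
      = fun (s : PySem.Set Int) (e : List Int) => PySem.Set.update s e := rfl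
  rw [h, pvFoldlUpdate]
  exact PySem.Set.update_nil_left _

theorem pvNodesB (edges : List (List Int)) :
    edges.foldl (fun s e => PySem.Set.update s e) PySem.Set.empty
      = PySem.Set.ofList edges.flatten := by
  rw [pvFoldlUpdate]; exact PySem.Set.update_nil_left _

-- the shared-edge relation
def pvRel (edges : List (List Int)) (a b : Int) : Prop := ∃ e ∈ edges, a ∈ e ∧ b ∈ e

-- ---- A side: initial dicts ----
theorem pvGraph0 (l : List Int) :
    ∀ (d : PySem.Dict Int (List Int)) (a : Int), d.getD a [] = [] →
      (l.foldl (fun d i => PySem.Dict.insert d i ([] : List Int)) d).getD a [] = [] := by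
  induction l with
  | nil => intro d a h; exact h
  | cons i t ih =>
    intro d a h
    simp only [List.foldl_cons]
    exact ih _ _ (by rw [PySem.Dict.getD_insert]; split <;> simp [h])

theorem pvVisited0 (l : List Int) :
    ∀ (d : PySem.Dict Int Bool) (x : Int), d.getD x false = false →
      (l.foldl (fun d i => PySem.Dict.insert d i false) d).getD x false = false := by
  induction l with
  | nil => intro d x h; exact h
  | cons i t ih =>
    intro d x h
    simp only [List.foldl_cons]
    exact ih _ _ (by rw [PySem.Dict.getD_insert]; split <;> simp [h])

-- ---- A side: the adjacency dict characterized ----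
def pvPairs (e : List Int) : List (Int × Int) :=
  ((List.range e.length).map (fun i => ((List.range e.length).map (fun j =>
    if e[i]! ≠ e[j]! then [(e[i]!, e[j]!), (e[j]!, e[i]!)] else [])).flatten)).flatten

theorem pvMemPairs (e : List Int) (a b : Int) :
    (a, b) ∈ pvPairs e ↔ a ∈ e ∧ b ∈ e ∧ a ≠ b := by
  unfold pvPairs
  simp only [List.mem_flatten, List.mem_map, List.mem_range]
  constructor
  · rintro ⟨l, ⟨i, hi, rfl⟩, hab⟩
    simp only [List.mem_flatten, List.mem_map, List.mem_range] at hab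
    obtain ⟨l2, ⟨j, hj, rfl⟩, hab⟩ := hab
    rw [List.mem_ite_nil_right] at hab
    obtain ⟨hne, hab⟩ := hab
    have hia : e[i]! = e[i]'hi := getElem!_pos e i hi
    have hjb : e[j]! = e[j]'hj := getElem!_pos e j hj
    have hie : e[i]! ∈ e := by rw [hia]; exact List.getElem_mem hi
    have hje : e[j]! ∈ e := by rw [hjb]; exact List.getElem_mem hj
    simp only [List.mem_cons, List.not_mem_nil, or_false] at hab
    rcases hab with h1 | h1
    · obtain ⟨rfl, rfl⟩ := Prod.mk.inj h1
      exact ⟨hie, hje, hne⟩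
    · obtain ⟨rfl, rfl⟩ := Prod.mk.inj h1
      exact ⟨hje, hie, fun hh => hne hh.symm⟩
  · rintro ⟨ha, hb, hne⟩
    obtain ⟨i, hi, hia⟩ := List.mem_iff_getElem.1 ha
    obtain ⟨j, hj, hjb⟩ := List.mem_iff_getElem.1 hb
    have hia' : e[i]! = a := by rw [getElem!_pos e i hi, hia]
    have hjb' : e[j]! = b := by rw [getElem!_pos e j hj, hjb]
    refine ⟨_, ⟨i, hi, rfl⟩, ?_⟩
    simp only [List.mem_flatten, List.mem_map, List.mem_range]
    refine ⟨_, ⟨j, hj, rfl⟩, ?_⟩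
    rw [List.mem_ite_nil_right, hia', hjb']
    exact ⟨hne, List.mem_cons_self ..⟩

theorem pvDbl (e : List Int) (g : PySem.Dict Int (List Int)) :
    (List.range e.length).foldl (fun g i =>
        (List.range e.length).foldl (fun g j =>
          if e[i]! ≠ e[j]! then
            PySem.Dict.modify
              (PySem.Dict.modify g (e[i]!) [] (fun l => l ++ [e[j]!]))
              (e[j]!) [] (fun l => l ++ [e[i]!])
          else g) g) g
      = (pvPairs e).foldl (fun d p => PySem.Dict.modify d p.1 [] (fun l => l ++ [p.2])) g := by
  unfold pvPairs
  rw [List.foldl_flatten, List.foldl_map]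
  congr 1
  funext g i
  rw [List.foldl_flatten, List.foldl_map]
  congr 1
  funext g j
  split
  · rfl
  · rfl

theorem pvMemGraph (edges : List (List Int)) :
    ∀ (g : PySem.Dict Int (List Int)) (a b : Int),
      (b ∈ (edges.foldl (fun g edge =>
        (List.range edge.length).foldl (fun g i =>
          (List.range edge.length).foldl (fun g j =>
            if edge[i]! ≠ edge[j]! then
              PySem.Dict.modify
                (PySem.Dict.modify g (edge[i]!) [] (fun l => l ++ [edge[j]!]))
                (edge[j]!) [] (fun l => l ++ [edge[i]!])
            else g) g) g) g).getD a []
      ↔ b ∈ g.getD a [] ∨ ∃ e ∈ edges, a ∈ e ∧ b ∈ e ∧ a ≠ b) := by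
  induction edges with
  | nil => simp
  | cons e t ih =>
    intro g a b
    simp only [List.foldl_cons]
    rw [ih]
    rw [pvDbl, PySem.Dict.getD_foldl_modify_append]
    simp only [List.mem_append, List.mem_map, List.mem_filter]
    constructor
    · rintro (⟨hg | ⟨⟨x, y⟩, ⟨hp, hx⟩, rfl⟩⟩ | ⟨e', he', h⟩)
      · exact Or.inl hg
      · have hxa : x = a := by simpa using hx
        exact Or.inr ⟨e, List.mem_cons_self .., hxa ▸ (pvMemPairs e x y).1 hp⟩
      · exact Or.inr ⟨e', List.mem_cons_of_mem _ he', h⟩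
    · rintro (hg | ⟨e', he', h⟩)
      · exact Or.inl (Or.inl hg)
      · rcases List.mem_cons.1 he' with rfl | he''
        · exact Or.inl (Or.inr ⟨(a, b), ⟨(pvMemPairs e' a b).2 h, by simp⟩, rfl⟩)
        · exact Or.inr ⟨e', he'', h⟩

-- ---- A side: DFS characterization (graph fixed; adjacency = membership in graph.getD) ----
theorem pvDfsMono (graph : PySem.Dict Int (List Int)) (visited : PySem.Dict Int Bool)
    (q : List Int) (x : Int) (hx : PySem.Dict.getD visited x false = true) :
    PySem.Dict.getD (pvDfs graph visited q) x false = true := by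
  fun_induction pvDfs graph visited q with
  | case1 => exact hx
  | case2 visited q v h hvis ih => exact ih hx
  | case3 visited q v h hvis ih =>
    apply ih
    rw [PySem.Dict.getD_insert]
    split <;> simp [hx]

theorem pvDfsQ (graph : PySem.Dict Int (List Int)) (visited : PySem.Dict Int Bool)
    (q : List Int) (x : Int) (hx : x ∈ q) :
    PySem.Dict.getD (pvDfs graph visited q) x false = true := by
  fun_induction pvDfs graph visited q with
  | case1 visited q h =>
    rw [List.getLast?_eq_none_iff] at h
    subst h; cases hx
  | case2 visited q v h hvis ih =>
    obtain ⟨t, rfl⟩ := List.getLast?_eq_some_iff.1 h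
    rw [List.dropLast_concat] at ih ⊢
    rcases List.mem_append.1 hx with hx' | hx'
    · exact ih hx'
    · rw [List.mem_singleton] at hx'
      subst hx'
      exact pvDfsMono _ _ _ _ hvis
  | case3 visited q v h hvis ih =>
    obtain ⟨t, rfl⟩ := List.getLast?_eq_some_iff.1 h
    rw [List.dropLast_concat] at ih ⊢
    rcases List.mem_append.1 hx with hx' | hx'
    · exact ih (List.mem_append.2 (Or.inl hx'))
    · rw [List.mem_singleton] at hx'
      subst hx'
      exact pvDfsMono _ _ _ _ (by rw [PySem.Dict.getD_insert]; simp)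

theorem pvDfsClosed (graph : PySem.Dict Int (List Int)) (visited : PySem.Dict Int Bool)
    (q : List Int)
    (hinv : ∀ w, PySem.Dict.getD visited w false = true →
      ∀ b ∈ PySem.Dict.getD graph w [], PySem.Dict.getD visited b false = true ∨ b ∈ q) :
    ∀ w, PySem.Dict.getD (pvDfs graph visited q) w false = true →
      ∀ b ∈ PySem.Dict.getD graph w [],
        PySem.Dict.getD (pvDfs graph visited q) b false = true := by
  fun_induction pvDfs graph visited q with
  | case1 visited q h =>
    rw [List.getLast?_eq_none_iff] at h
    subst h
    intro w hw b hb
    rcases hinv w hw b hb with h' | h'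
    · exact h'
    · cases h'
  | case2 visited q v h hvis ih =>
    obtain ⟨t, rfl⟩ := List.getLast?_eq_some_iff.1 h
    rw [List.dropLast_concat] at ih ⊢
    apply ih
    intro w hw b hb
    rcases hinv w hw b hb with h' | h'
    · exact Or.inl h'
    · rcases List.mem_append.1 h' with h'' | h''
      · exact Or.inr h''
      · rw [List.mem_singleton] at h''
        subst h''
        exact Or.inl hvis
  | case3 visited q v h hvis ih =>
    obtain ⟨t, rfl⟩ := List.getLast?_eq_some_iff.1 h
    rw [List.dropLast_concat] at ih ⊢
    apply ih
    intro w hw b hb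
    rw [PySem.Dict.getD_insert] at hw
    by_cases hwv : w = v
    · subst hwv
      exact Or.inr (List.mem_append.2 (Or.inr hb))
    · rw [if_neg hwv] at hw
      rcases hinv w hw b hb with h' | h'
      · exact Or.inl (by rw [PySem.Dict.getD_insert]; split <;> simp [h'])
      · rcases List.mem_append.1 h' with h'' | h''
        · exact Or.inr (List.mem_append.2 (Or.inl h''))
        · rw [List.mem_singleton] at h''
          subst h''
          exact Or.inl (by rw [PySem.Dict.getD_insert]; simp)

theorem pvDfsSound (graph : PySem.Dict Int (List Int)) (visited : PySem.Dict Int Bool)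
    (q : List Int) (R : Int → Prop)
    (hR : ∀ v b, R v → b ∈ PySem.Dict.getD graph v [] → R b)
    (hq : ∀ x ∈ q, R x)
    (hv : ∀ x, PySem.Dict.getD visited x false = true → R x) :
    ∀ x, PySem.Dict.getD (pvDfs graph visited q) x false = true → R x := by
  fun_induction pvDfs graph visited q with
  | case1 visited q h => exact hv
  | case2 visited q v h hvis ih =>
    obtain ⟨t, rfl⟩ := List.getLast?_eq_some_iff.1 h
    rw [List.dropLast_concat] at ih ⊢
    exact ih (fun x hx => hq x (List.mem_append.2 (Or.inl hx))) hv
  | case3 visited q v h hvis ih =>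
    obtain ⟨t, rfl⟩ := List.getLast?_eq_some_iff.1 h
    rw [List.dropLast_concat] at ih ⊢
    have hRv : R v := hq v (List.mem_append.2 (Or.inr (List.mem_singleton.2 rfl)))
    apply ih
    · intro x hx
      rcases List.mem_append.1 hx with h' | h'
      · exact hq x (List.mem_append.2 (Or.inl h'))
      · exact hR v x hRv h'
    · intro x hx
      rw [PySem.Dict.getD_insert] at hx
      by_cases hxv : x = v
      · subst hxv; exact hRv
      · rw [if_neg hxv] at hx
        exact hv x hx

-- ---- B side: saturation characterization ----
theorem pvPassNoChange (edges : List (List Int)) (reached : PySem.Set Int)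
    (h : (pvPass edges reached).2 = false) :
    (pvPass edges reached).1 = reached ∧ ∀ e ∈ edges,
      (!(e.all (fun x => PySem.Set.contains reached x)) &&
        e.any (fun x => PySem.Set.contains reached x)) = false := by
  unfold pvPass at *
  induction edges generalizing reached with
  | nil => exact ⟨rfl, by simp⟩
  | cons e t ih =>
    simp only [List.foldl_cons] at h ⊢
    by_cases hc : (!(e.all (fun x => PySem.Set.contains reached x)) &&
        e.any (fun x => PySem.Set.contains reached x)) = true
    · have habs : pvAbsorb (reached, false) e = (PySem.Set.update reached e, true) := by
        unfold pvAbsorb; simp only [] at hc ⊢; rw [if_pos hc]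
      rw [habs] at h
      rw [pvFold_snd_true] at h
      cases h
    · have habs : pvAbsorb (reached, false) e = (reached, false) := by
        unfold pvAbsorb; simp only [] at hc ⊢; rw [if_neg hc]
      rw [habs] at h ⊢
      obtain ⟨h1, h2⟩ := ih reached h
      refine ⟨h1, ?_⟩
      intro e' he'
      rcases List.mem_cons.1 he' with rfl | he''
      · exact Bool.eq_false_iff.mpr hc
      · exact h2 e' he''

theorem pvPassSound (edges : List (List Int)) (R : Int → Prop)
    (hcl : ∀ e ∈ edges, (∃ y ∈ e, R y) → ∀ x ∈ e, R x) :
    ∀ (p : PySem.Set Int × Bool), (∀ x ∈ p.1, R x) →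
      ∀ x ∈ (edges.foldl pvAbsorb p).1, R x := by
  induction edges with
  | nil => intro p hp; exact hp
  | cons e t ih =>
    intro p hp x hx
    simp only [List.foldl_cons] at hx
    refine ih (fun e' he' => hcl e' (List.mem_cons_of_mem _ he')) _ ?_ x hx
    intro y hy
    unfold pvAbsorb at hy
    split at hy
    · rename_i hc
      rcases (PySem.Set.mem_update _ _ _).1 hy with hy' | hy'
      · exact hp y hy'
      · rw [Bool.and_eq_true] at hc
        obtain ⟨z, hz, hzc⟩ := List.any_eq_true.1 hc.2
        exact hcl e (List.mem_cons_self ..) ⟨z, hz, hp z ((PySem.Set.contains_iff _ _).1 hzc)⟩ y hy'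
    · exact hp y hy

theorem pvSatSub (edges : List (List Int)) (reached : PySem.Set Int) :
    ∀ x ∈ reached, x ∈ pvSat edges reached := by
  fun_induction pvSat edges reached with
  | case1 reached p hp ih =>
    intro x hx
    exact ih x (pvFold_fst_mono edges _ x hx)
  | case2 reached p hp =>
    intro x hx
    exact pvFold_fst_mono edges _ x hx

theorem pvSatClosed (edges : List (List Int)) (reached : PySem.Set Int) :
    ∀ e ∈ edges, (∃ y ∈ e, y ∈ pvSat edges reached) →
      ∀ x ∈ e, x ∈ pvSat edges reached := by
  fun_induction pvSat edges reached with
  | case1 reached p hp ih => exact ih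
  | case2 reached p hp =>
    intro e he hy x hx
    obtain ⟨h1, h2⟩ := pvPassNoChange edges reached (Bool.eq_false_iff.mpr hp)
    rw [h1] at hy ⊢
    obtain ⟨y, hye, hyr⟩ := hy
    rcases Bool.and_eq_false_iff.1 (h2 e he) with h3 | h3
    · rw [Bool.not_eq_false'] at h3
      exact (PySem.Set.contains_iff _ _).1 (List.all_eq_true.1 h3 x hx)
    · exact absurd (List.any_eq_true.2 ⟨y, hye, (PySem.Set.contains_iff _ _).2 hyr⟩)
        (by rw [h3]; simp)

theorem pvSatSound (edges : List (List Int)) (reached : PySem.Set Int) (R : Int → Prop)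
    (hcl : ∀ e ∈ edges, (∃ y ∈ e, R y) → ∀ x ∈ e, R x)
    (hr : ∀ x ∈ reached, R x) :
    ∀ x ∈ pvSat edges reached, R x := by
  fun_induction pvSat edges reached with
  | case1 reached p hp ih => exact ih (pvPassSound edges R hcl _ hr)
  | case2 reached p hp => exact pvPassSound edges R hcl _ hr

theorem pvPassNodup (edges : List (List Int)) :
    ∀ (p : PySem.Set Int × Bool), p.1.Nodup → (edges.foldl pvAbsorb p).1.Nodup := by
  induction edges with
  | nil => intro p hp; exact hp
  | cons e t ih =>
    intro p hp
    simp only [List.foldl_cons]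
    apply ih
    unfold pvAbsorb
    split
    · exact PySem.Set.nodup_update _ _ hp
    · exact hp

theorem pvSatNodup (edges : List (List Int)) (reached : PySem.Set Int)
    (hr : reached.Nodup) : (pvSat edges reached).Nodup := by
  fun_induction pvSat edges reached with
  | case1 reached p hp ih => exact ih (pvPassNodup edges _ hr)
  | case2 reached p hp => exact pvPassNodup edges _ hr

-- the saturated set is exactly the pvRel-component of the seed
theorem pvSatChar (edges : List (List Int)) (root : Int) :
    ∀ x, x ∈ pvSat edges (PySem.Set.add PySem.Set.empty root) ↔
      Relation.ReflTransGen (pvRel edges) root x := by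
  intro x
  constructor
  · apply pvSatSound edges _ (Relation.ReflTransGen (pvRel edges) root)
    · intro e he hy z hz
      obtain ⟨y, hye, hyR⟩ := hy
      exact Relation.ReflTransGen.tail hyR ⟨e, he, hye, hz⟩
    · intro z hz
      have : z = root := by
        rcases (PySem.Set.mem_add _ _ _).1 hz with h' | h'
        · cases h'
        · exact h'
      subst this
      exact Relation.ReflTransGen.refl
  · intro hreach
    induction hreach with
    | refl =>
      exact pvSatSub edges _ root ((PySem.Set.mem_add _ _ _).2 (Or.inr rfl))
    | @tail b c hab hbc ih =>
      obtain ⟨e, he, hb, hc⟩ := hbc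
      exact pvSatClosed edges _ e he ⟨b, hb, ih⟩ c hc

-- everything the relation reaches from a member of flatten stays in flatten
theorem pvReachMem (edges : List (List Int)) (root x : Int)
    (hroot : root ∈ edges.flatten)
    (h : Relation.ReflTransGen (pvRel edges) root x) : x ∈ edges.flatten := by
  induction h with
  | refl => exact hroot
  | tail hab hbc ih =>
    obtain ⟨e, he, _, hc⟩ := hbc
    exact List.mem_flatten.2 ⟨e, he, hc⟩

-- counting: a Nodup subset of a Nodup list has equal length iff it exhausts it
theorem pvLenEq (S T : List Int) (hS : S.Nodup) (hT : T.Nodup)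
    (hsub : ∀ x ∈ S, x ∈ T) :
    (S.length = T.length ↔ ∀ x ∈ T, x ∈ S) := by
  have hfs : S.toFinset ⊆ T.toFinset := by
    intro x hx
    exact List.mem_toFinset.2 (hsub x (List.mem_toFinset.1 hx))
  constructor
  · intro hlen x hx
    have hEq := Finset.eq_of_subset_of_card_le hfs
      (by rw [List.toFinset_card_of_nodup hS, List.toFinset_card_of_nodup hT, hlen])
    have hx' : x ∈ T.toFinset := List.mem_toFinset.2 hx
    rw [← hEq] at hx'
    exact List.mem_toFinset.1 hx'
  · intro hall
    have hfs2 : T.toFinset ⊆ S.toFinset := by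
      intro x hx
      exact List.mem_toFinset.2 (hall x (List.mem_toFinset.1 hx))
    have hEq := Finset.Subset.antisymm hfs hfs2
    rw [← List.toFinset_card_of_nodup hS, ← List.toFinset_card_of_nodup hT, hEq]

theorem pvHeadOfList (x : Int) (xs : List Int) :
    (PySem.Set.ofList (x :: xs))[0]! = x := by
  rw [PySem.Set.ofList_cons]
  rfl

-- visited set computed by A's DFS = pvRel-component of the root
theorem pvAChar (edges : List (List Int)) (ns : List Int) (root : Int) :
    ∀ i, PySem.Dict.getD (pvDfs
        (edges.foldl (fun g edge =>
          (List.range edge.length).foldl (fun g i =>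
            (List.range edge.length).foldl (fun g j =>
              if edge[i]! ≠ edge[j]! then
                PySem.Dict.modify
                  (PySem.Dict.modify g (edge[i]!) [] (fun l => l ++ [edge[j]!]))
                  (edge[j]!) [] (fun l => l ++ [edge[i]!])
              else g) g) g)
          (ns.foldl (fun d i => PySem.Dict.insert d i ([] : List Int)) PySem.Dict.empty))
        (ns.foldl (fun d i => PySem.Dict.insert d i false) PySem.Dict.empty)
        [root]) i false = true
      ↔ Relation.ReflTransGen (pvRel edges) root i := by
  have hvis0 : ∀ y, PySem.Dict.getD
      (ns.foldl (fun d i => PySem.Dict.insert d i false) PySem.Dict.empty) y false = false :=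
    fun y => pvVisited0 ns _ y (PySem.Dict.getD_empty ..)
  have hg0 : ∀ a, PySem.Dict.getD
      (ns.foldl (fun d i => PySem.Dict.insert d i ([] : List Int)) PySem.Dict.empty) a [] = [] :=
    fun a => pvGraph0 ns _ a (PySem.Dict.getD_empty ..)
  intro i
  constructor
  · apply pvDfsSound _ _ _ (Relation.ReflTransGen (pvRel edges) root)
    · intro v b hRv hb
      rw [pvMemGraph] at hb
      rcases hb with hb | ⟨e, he, hv', hb', _⟩
      · rw [hg0 v] at hb; cases hb
      · exact Relation.ReflTransGen.tail hRv ⟨e, he, hv', hb'⟩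
    · intro y hy
      rw [List.mem_singleton] at hy
      subst hy
      exact Relation.ReflTransGen.refl
    · intro y hy
      rw [hvis0 y] at hy
      cases hy
  · intro h
    induction h with
    | refl => exact pvDfsQ _ _ _ root (List.mem_singleton.2 rfl)
    | @tail b c hab hbc ih =>
      by_cases hbc' : b = c
      · subst hbc'; exact ih
      · obtain ⟨e, he, hb, hc⟩ := hbc
        refine pvDfsClosed _ _ _ ?_ b ih c ?_
        · intro w hw
          rw [hvis0 w] at hw
          cases hw
        · rw [pvMemGraph]
          exact Or.inr ⟨e, he, hb, hc, hbc'⟩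

-- the two ports agree on every input satisfying Pre_
theorem pvMain (edges : List (List Int)) (N : Int)
    (hpre : Pre_is_connected edges N) :
    is_connected edges N = is_connected_alt edges N := by
  unfold is_connected is_connected_alt
  simp only [pvNodesA, pvNodesB]
  by_cases hN : ((PySem.Set.ofList edges.flatten).length : Int) ≠ N
  · rw [if_pos hN, if_pos hN]
  · rw [if_neg hN, if_neg hN]
    push_neg at hN
    cases hfl : edges.flatten with
    | nil =>
      exfalso
      rcases hpre with hp | hp
      · exact hp hfl
      · apply hp
        rw [← hN, hfl]
        rfl
    | cons x xs =>
      have hempty : (PySem.Set.ofList (x :: xs)).isEmpty = false := by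
        rw [PySem.Set.ofList_cons]; rfl
      rw [hempty]
      simp only [Bool.false_eq_true, if_false]
      rw [pvHeadOfList]
      have hxflat : (x :: xs)[0]! = x := rfl
      rw [hxflat]
      apply Bool.eq_iff_iff.mpr
      rw [List.all_eq_true, beq_iff_eq]
      have hchar := pvSatChar edges x
      have hSnodup : (pvSat edges (PySem.Set.add PySem.Set.empty x)).Nodup :=
        pvSatNodup _ _ (PySem.Set.nodup_add _ _ List.nodup_nil)
      have hrootfl : x ∈ edges.flatten := by rw [hfl]; exact List.mem_cons_self ..
      have hsub : ∀ y ∈ pvSat edges (PySem.Set.add PySem.Set.empty x),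
          y ∈ PySem.Set.ofList (x :: xs) := by
        intro y hy
        have hr := (hchar y).1 hy
        have := pvReachMem edges x y hrootfl hr
        rw [hfl] at this
        exact (PySem.Set.mem_ofList _ _).2 this
      rw [pvLenEq _ _ hSnodup (PySem.Set.nodup_ofList _) hsub]
      have hA := pvAChar edges (PySem.Set.ofList (x :: xs)) x
      constructor
      · intro h y hy
        exact (hchar y).2 ((hA y).1 (h y hy))
      · intro h y hy
        exact (hA y).2 ((hchar y).1 (h y hy))

-- ===== VERDICT (by name: the statement is the Claim_ definition above) =====
theorem is_connected_spec : Claim_equal_is_connected := by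
  intro edges N _ hpre
  unfold Spec_is_connected
  exact pvMain edges N hpre
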